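-- pv_equiv track=rewrite | github.com/kobejean/cp-library | cp_library/bit/pack/pack_cls.py | irank
-- ===== SOURCE A (Python) =====
-- class Packer:
--     def __init__(P, mx: int):
--         P.s = mx.bit_length()
--         P.m = (1 << P.s) - 1
--     def enc(P, a: int, b: int): return a << P.s | b
--     def dec(P, x: int) -> tuple[int, int]: return x >> P.s, x & P.m
--     def enumerate(P, A, reverse=False): P.ienumerate(A:=A.copy(), reverse); return A
--     def ienumerate(P, A, reverse=False):
--         if reverse:
--             for i,a in enumerate(A): A[i] = P.enc(-a, i)
--         else:
--             for i,a in enumerate(A): A[i] = P.enc(a, i)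
--     def indices(P, A: list[int]): P.iindices(A:=A.copy()); return A
--     def iindices(P, A):
--         for i,a in enumerate(A): A[i] = P.m&a
--
-- def irank(A: list[int], distinct = False):
--     P = Packer(len(A)-1)
--     V = P.enumerate(A); V.sort()
--     if distinct:
--         for r, ai in enumerate(V): a, i = P.dec(ai); A[i], V[r] = r, a
--     else:
--         r = p = -1
--         for ai in V:
--             a, i = P.dec(ai)
--             if a!=p: V[r:=r+1] = p = a
--             A[i] = r
--         del V[r+1:]
--     return V
-- ===== SOURCE B (Python) =====
-- def irank(A: list[int], distinct = False):
--     if distinct: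
--         order = sorted(range(len(A)), key=lambda i: A[i])
--         V = [A[i] for i in order]
--         for r, i in enumerate(order):
--             A[i] = r
--         return V
--     V = sorted(set(A))
--     rank = {v: r for r, v in enumerate(V)}
--     for i, a in enumerate(A):
--         A[i] = rank[a]
--     return V
-- ===== Notes on version B (the rewrite author's own statement) =====
-- stated objective: idiomatic
-- what changed: Replaces the Packer bit-packing ((value<<s)|index encode, sort packed ints, shift/mask decode) by plain stable sorts: sorted(set(A)) plus a rank dict for distinct=False, and an index argsort for distinct=True.
-- intended difference: When distinct=False and min(A) == -1, A's dedup scan starts its 'previous value' sentinel at -1, so the -1 group is never emitted and A returns the sorted distinct values without -1 (e.g. [5] for A=[-1,5]); B returns the intended sorted(set(A)) including -1. — e.g. on irank([-1, 1], false): A returns [1], B returns [-1, 1]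
import Mathlib
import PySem

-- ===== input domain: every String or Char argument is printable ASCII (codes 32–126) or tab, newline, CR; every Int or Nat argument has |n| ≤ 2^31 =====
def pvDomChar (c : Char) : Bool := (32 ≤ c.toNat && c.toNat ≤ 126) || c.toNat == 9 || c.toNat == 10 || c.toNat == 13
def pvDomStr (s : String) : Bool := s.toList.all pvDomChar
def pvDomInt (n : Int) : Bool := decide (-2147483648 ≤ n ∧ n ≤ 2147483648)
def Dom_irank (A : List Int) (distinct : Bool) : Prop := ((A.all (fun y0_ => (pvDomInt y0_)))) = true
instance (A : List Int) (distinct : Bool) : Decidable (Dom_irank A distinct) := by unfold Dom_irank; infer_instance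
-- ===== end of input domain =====

-- B replaces A's bit-packed (value<<s | index) sort/decode machinery by a plain stable sort
-- (hash-set + sort for distinct=False, index argsort for distinct=True); equivalence is about the
-- RETURN value only — both Pythons also write the ranks into the argument list A in place.

-- ===== PORT A =====
def irank (A : List Int) (distinct : Bool) : List Int :=
  -- P = Packer(len(A)-1): P.s = (len(A)-1).bit_length(), P.m = (1 << P.s) - 1
  let s : Nat := PySem.Int.bitLength ((A.length : Int) - 1)
  let m : Int := (1 <<< s) - 1
  -- V = P.enumerate(A): a copy of A with A[i] = P.enc(a, i) = a << s | i
  -- (ienumerate writes each index right after reading it, so folding over the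
  --  precomputed enumerate is exact)
  let V := (PySem.List.enumerate A).foldl
      (fun (V : List Int) (p : Int × Int) => PySem.List.pySetD V p.1 (PySem.Int.bor (p.2 <<< s) p.1)) A
  let V := PySem.List.sorted V (fun x => x)          -- V.sort()
  if distinct then
    -- for r, ai in enumerate(V): a, i = P.dec(ai); A[i], V[r] = r, a
    -- (the write A[i] = r only mutates the argument, which is not returned;
    --  V[r] is written right after V[r] was read, so folding over the
    --  precomputed enumerate is exact)
    (PySem.List.enumerate V).foldl
      (fun (W : List Int) (p : Int × Int) => PySem.List.pySetD W p.1 ((p.2 >>> s, PySem.Int.band p.2 m).1)) V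
  else
    -- r = p = -1
    -- for ai in V: a, i = P.dec(ai); (if a != p: V[r:=r+1] = p = a); A[i] = r
    -- (A[i] = r only mutates the argument; the V[r+1] write is at an index ≤ the
    --  position of ai, never ahead of the iterator, so folding the list is exact)
    let st := V.foldl
      (fun (st : List Int × Int × Int) (ai : Int) =>
        let a := (ai >>> s, PySem.Int.band ai m).1
        if a ≠ st.2.2 then (PySem.List.pySetD st.1 (st.2.1 + 1) a, st.2.1 + 1, a) else st)
      (V, -1, -1)
    st.1.take (st.2.1 + 1).toNat           -- del V[r+1:]  (here r+1 ≥ 0, so this is take)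

-- ===== PORT B =====
def irank_alt (A : List Int) (distinct : Bool) : List Int :=
  if distinct then
    -- order = sorted(range(len(A)), key=lambda i: A[i])  (i is always in range, so A[i] = pyGetD)
    let order := PySem.List.sorted (PySem.List.pyRange 0 (A.length : Int) 1)
        (fun i => PySem.List.pyGetD A i 0)
    -- V = [A[i] for i in order]
    let V := order.map (fun i => PySem.List.pyGetD A i 0)
    -- for r, i in enumerate(order): A[i] = r   -- mutates the argument only; V is returned
    V
  else
    -- V = sorted(set(A))
    let V := PySem.List.sorted (PySem.Set.ofList A) (fun v => v)
    -- rank = {v: r for r, v in enumerate(V)}; for i, a in enumerate(A): A[i] = rank[a]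
    --   -- mutates the argument only; V is returned
    V

-- ===== PRECONDITION & SPEC =====
-- When distinct=False and the minimum of A is exactly -1, A's scan never emits the -1 group
-- (its running value p starts at the sentinel -1, so 'a != p' fails), returning the sorted
-- distinct values with -1 missing, while B returns the intended full sorted(set(A)).
def D_irank (A : List Int) (distinct : Bool) : Prop :=
  distinct = false ∧ (-1 : Int) ∈ A ∧ ∀ x ∈ A, (-1 : Int) ≤ x
instance (A : List Int) (distinct : Bool) : Decidable (D_irank A distinct) := by
  unfold D_irank; infer_instance

def Spec_irank (A : List Int) (distinct : Bool) (out : List Int) : Prop :=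
  ¬ D_irank A distinct → out = irank_alt A distinct
instance (A : List Int) (distinct : Bool) (out : List Int) : Decidable (Spec_irank A distinct out) := by
  unfold Spec_irank; infer_instance

def pvDiffWitness_irank : List Int × Bool := ([-1, 1], false)
def pvDiffWitnessOut_irank : (List Int) × (List Int) := ([1], [-1, 1])

-- ===== CLAIM (what is proved, stated in full; the proofs are below) =====
def Claim_unchanged_irank : Prop :=
  ∀ (A : List Int) (distinct : Bool), Dom_irank A distinct → Spec_irank A distinct (irank A distinct)
def Claim_changed_irank : Prop :=
  Dom_irank (pvDiffWitness_irank.1) (pvDiffWitness_irank.2) ∧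
  D_irank (pvDiffWitness_irank.1) (pvDiffWitness_irank.2) ∧
  irank (pvDiffWitness_irank.1) (pvDiffWitness_irank.2) = pvDiffWitnessOut_irank.1 ∧
  irank_alt (pvDiffWitness_irank.1) (pvDiffWitness_irank.2) = pvDiffWitnessOut_irank.2 ∧
  pvDiffWitnessOut_irank.1 ≠ pvDiffWitnessOut_irank.2
def Claim_exact_irank : Prop :=
  ∀ (A : List Int) (distinct : Bool), Dom_irank A distinct → D_irank A distinct →
    irank A distinct ≠ irank_alt A distinct

-- ===== LEMMAS AND PROOFS =====

-- the value-stable-sorted enumerate of A, and its value list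
def pairsL (A : List Int) : List (Int × Int) :=
  PySem.List.sorted (PySem.List.enumerate A) (fun p => p.2)
def valsL (A : List Int) : List Int := (pairsL A).map (fun p => p.2)

-- bit-packing of a pair, as plain arithmetic
def encF (s : Nat) (p : Int × Int) : Int := p.2 * 2 ^ s + p.1

-- A's dedup scan (sentinel -1 is the caller's start value)
def goS (p : Int) : List Int → List Int
  | [] => []
  | a :: l => if a ≠ p then a :: goS a l else goS p l

-- ---- bit lemmas ----
lemma enc_eq (a i : Int) (s : Nat) (h0 : 0 ≤ i) (h1 : i < 2 ^ s) :
    PySem.Int.bor (a <<< s) i = a * 2 ^ s + i := by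
  have hpow : (0:Int) < 2 ^ s := by positivity
  obtain ⟨k, hk⟩ := Int.eq_ofNat_of_zero_le h0
  have hke : k < 2 ^ s := by exact_mod_cast hk ▸ h1
  rw [Int.shiftLeft_eq]
  rcases le_or_gt (0:Int) a with ha | ha
  · obtain ⟨m, hm⟩ := Int.eq_ofNat_of_zero_le ha
    subst hm hk
    have hx : ((m:Int)) * 2 ^ s = ((m * 2 ^ s : Nat) : Int) := by push_cast; ring
    rw [hx, PySem.Int.bor_of_nonneg (by positivity) h0]
    have := Nat.two_pow_add_eq_or_of_lt hke m
    simp only [Int.toNat_natCast]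
    rw [Nat.mul_comm m (2^s), ← this]
    push_cast; ring
  · have hneg : a * 2 ^ s < 0 := mul_neg_of_neg_of_pos ha hpow
    have hM : (0:Int) ≤ -a - 1 := by omega
    obtain ⟨M, hMe⟩ := Int.eq_ofNat_of_zero_le hM
    have he1 : (1:Nat) ≤ 2 ^ s := Nat.one_le_two_pow
    have hc : (-(a * 2 ^ s) - 1 : Int) = ((M * 2 ^ s + (2 ^ s - 1) : Nat) : Int) := by
      push_cast [he1]
      rw [← hMe]; ring
    unfold PySem.Int.bor
    rw [if_neg (by omega), if_pos h0, hc, hk]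
    simp only [Int.toNat_natCast]
    have handk : (M * 2 ^ s + (2 ^ s - 1)) &&& k = k := by
      have h2 : k &&& (2 ^ s - 1) = k := by
        rw [Nat.and_two_pow_sub_one_eq_mod, Nat.mod_eq_of_lt hke]
      conv_lhs => rw [← h2, Nat.and_comm k (2^s-1), ← Nat.and_assoc]
      rw [Nat.and_two_pow_sub_one_eq_mod, Nat.add_comm, Nat.add_mul_mod_self_right, Nat.mod_eq_of_lt (by omega), Nat.and_comm, h2]
    rw [handk]
    have hle : k ≤ M * 2 ^ s + (2 ^ s - 1) := by
      have := Nat.le_sub_one_of_lt hke; omega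
    rw [Int.ofNat_sub hle]
    push_cast [he1]
    rw [← hMe]; ring

lemma dec_fst (a i : Int) (s : Nat) (h0 : 0 ≤ i) (h1 : i < 2 ^ s) :
    (a * 2 ^ s + i) >>> s = a := by
  have hc : ((2:Int) ^ s) = ((2 ^ s : Nat) : Int) := by push_cast; ring
  rw [Int.shiftRight_eq_div_pow, add_comm, ← hc, Int.add_mul_ediv_right _ _ (by positivity),
    Int.ediv_eq_zero_of_lt h0 h1, zero_add]

lemma encF_lt (s : Nat) (p q : Int × Int)
    (hp : 0 ≤ p.1 ∧ p.1 < 2 ^ s) (hq : 0 ≤ q.1 ∧ q.1 < 2 ^ s)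
    (h : p.2 < q.2 ∨ (p.2 = q.2 ∧ p.1 < q.1)) : encF s p < encF s q := by
  unfold encF
  rcases h with h | ⟨h1, h2⟩
  · have : (p.2 + 1) * 2 ^ s ≤ q.2 * 2 ^ s :=
      mul_le_mul_of_nonneg_right (by omega) (by positivity)
    nlinarith [hp.2, hq.1]
  · rw [h1]; omega

-- ---- enumerate-and-set fold = map, and insertion-sort structural lemmas ----
lemma foldl_enum_set {α : Type} (f : Int → α → α) (xs : List α) : ∀ (pre : List α),
    (PySem.List.enumerate xs (pre.length : Int)).foldl
        (fun V p => PySem.List.pySetD V p.1 (f p.1 p.2)) (pre ++ xs)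
      = pre ++ (PySem.List.enumerate xs (pre.length : Int)).map (fun p => f p.1 p.2) := by
  induction xs with
  | nil => intro pre; simp [PySem.List.enumerate]
  | cons x xs ih =>
    intro pre
    rw [PySem.List.enumerate_cons]
    simp only [List.foldl_cons, List.map_cons]
    have hset : PySem.List.pySetD (pre ++ x :: xs) ((pre.length : Int)) (f (pre.length) x)
        = (pre ++ [f (pre.length) x]) ++ xs := by
      rw [PySem.List.pySetD_natCast, List.set_append, if_neg (by omega)]
      simp
    rw [hset]
    have hlen : ((pre.length : Int) + 1) = (((pre ++ [f (pre.length) x]).length : Int)) := by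
      simp
    rw [hlen, ih]
    simp

lemma insertBy_map {α β : Type} (f : α → β) (bf : β → β → Bool) (x : α) (ys : List α) :
    PySem.List.insertBy bf (f x) (ys.map f)
      = (PySem.List.insertBy (fun a b => bf (f a) (f b)) x ys).map f := by
  induction ys with
  | nil => simp [PySem.List.insertBy]
  | cons y ys ih =>
    simp only [List.map_cons, PySem.List.insertBy.eq_2]
    split <;> simp_all

lemma foldl_ins_map {α β κ : Type} [LT κ] [DecidableLT κ] (f : α → β) (key : β → κ)
    (xs : List α) : ∀ (acc : List α),
    (xs.map f).foldl (fun acc y => PySem.List.insertBy (fun a b => decide (key a < key b)) y acc)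
        (acc.map f)
      = (xs.foldl (fun acc x =>
          PySem.List.insertBy (fun a b => decide (key (f a) < key (f b))) x acc) acc).map f := by
  induction xs with
  | nil => intro acc; simp
  | cons x xs ih =>
    intro acc
    simp only [List.map_cons, List.foldl_cons]
    rw [insertBy_map f _ x acc]
    exact ih _

lemma sorted_map_natural {α β κ : Type} [LT κ] [DecidableLT κ] (f : α → β) (key : β → κ)
    (xs : List α) :
    PySem.List.sorted (xs.map f) key = (PySem.List.sorted xs (fun x => key (f x))).map f := by
  rw [PySem.List.sorted_eq_foldl_insertBy, PySem.List.sorted_eq_foldl_insertBy]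
  simpa using foldl_ins_map f key xs []

lemma insertBy_congr {α : Type} (bf1 bf2 : α → α → Bool) (x : α) (ys : List α)
    (h : ∀ y ∈ ys, bf1 x y = bf2 x y) :
    PySem.List.insertBy bf1 x ys = PySem.List.insertBy bf2 x ys := by
  induction ys with
  | nil => simp [PySem.List.insertBy]
  | cons y ys ih =>
    rw [PySem.List.insertBy.eq_2, PySem.List.insertBy.eq_2, h y (by simp)]
    split
    · rfl
    · rw [ih (fun z hz => h z (by simp [hz]))]

lemma foldl_ins_congr {α κ : Type} [LT κ] [DecidableLT κ] (k1 k2 : α → κ) (xs : List α) :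
    ∀ (acc : List α), (∀ x ∈ xs, k1 x = k2 x) → (∀ y ∈ acc, k1 y = k2 y) →
    xs.foldl (fun acc x => PySem.List.insertBy (fun a b => decide (k1 a < k1 b)) x acc) acc
      = xs.foldl (fun acc x => PySem.List.insertBy (fun a b => decide (k2 a < k2 b)) x acc) acc := by
  induction xs with
  | nil => intro acc _ _; rfl
  | cons x xs ih =>
    intro acc hxs hacc
    simp only [List.foldl_cons]
    have hx := hxs x (by simp)
    rw [insertBy_congr _ (fun a b => decide (k2 a < k2 b)) x acc
      (fun y hy => by rw [hx, hacc y hy])]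
    apply ih
    · exact fun z hz => hxs z (by simp [hz])
    · intro y hy
      rcases (PySem.List.insertBy_mem_iff _ x y acc).1 hy with rfl | hy
      · exact hx
      · exact hacc y hy

lemma sorted_congr_key {α κ : Type} [LT κ] [DecidableLT κ] (k1 k2 : α → κ) (xs : List α)
    (h : ∀ x ∈ xs, k1 x = k2 x) :
    PySem.List.sorted xs k1 = PySem.List.sorted xs k2 := by
  rw [PySem.List.sorted_eq_foldl_insertBy, PySem.List.sorted_eq_foldl_insertBy]
  exact foldl_ins_congr k1 k2 xs [] h (by simp)

lemma insertBy_stable {α : Type} (key : α → Int) (R : α → α → Prop) (x : α) (acc : List α)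
    (hacc : acc.Pairwise (fun a b => key a < key b ∨ (key a = key b ∧ R a b)))
    (hR : ∀ y ∈ acc, R y x) :
    (PySem.List.insertBy (fun a b => decide (key a < key b)) x acc).Pairwise
      (fun a b => key a < key b ∨ (key a = key b ∧ R a b)) := by
  induction acc with
  | nil => simp [PySem.List.insertBy]
  | cons y ys ih =>
    rw [List.pairwise_cons] at hacc
    rw [PySem.List.insertBy.eq_2]
    split
    · rename_i hlt
      simp only [decide_eq_true_eq] at hlt
      refine List.Pairwise.cons ?_ (List.Pairwise.cons hacc.1 hacc.2)
      intro z hz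
      rcases List.mem_cons.1 hz with rfl | hz
      · exact Or.inl hlt
      · rcases hacc.1 z hz with h | ⟨h1, _⟩
        · exact Or.inl (lt_trans hlt h)
        · exact Or.inl (h1 ▸ hlt)
    · rename_i hge
      simp only [decide_eq_true_eq] at hge
      rw [Int.not_lt] at hge
      refine List.Pairwise.cons ?_ (ih hacc.2 (fun z hz => hR z (by simp [hz])))
      intro z hz
      rcases (PySem.List.insertBy_mem_iff _ x z ys).1 hz with rfl | hz
      · rcases lt_or_eq_of_le hge with h | h
        · exact Or.inl h
        · exact Or.inr ⟨h, hR y (by simp)⟩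
      · exact hacc.1 z hz

lemma sorted_stable_aux {α : Type} (key : α → Int) (R : α → α → Prop) (xs : List α) :
    ∀ (acc : List α),
    acc.Pairwise (fun a b => key a < key b ∨ (key a = key b ∧ R a b)) →
    (∀ y ∈ acc, ∀ x ∈ xs, R y x) → xs.Pairwise R →
    (xs.foldl (fun acc x => PySem.List.insertBy (fun a b => decide (key a < key b)) x acc)
        acc).Pairwise (fun a b => key a < key b ∨ (key a = key b ∧ R a b)) := by
  induction xs with
  | nil => intro acc h _ _; exact h
  | cons x xs ih =>
    intro acc hacc hcross hxs
    rw [List.pairwise_cons] at hxs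
    simp only [List.foldl_cons]
    apply ih
    · exact insertBy_stable key R x acc hacc (fun y hy => hcross y hy x (by simp))
    · intro y hy x' hx'
      rcases (PySem.List.insertBy_mem_iff _ x y acc).1 hy with rfl | hy
      · exact hxs.1 x' hx'
      · exact hcross y hy x' (by simp [hx'])
    · exact hxs.2

lemma sorted_stable {α : Type} (key : α → Int) (R : α → α → Prop) (xs : List α)
    (h : xs.Pairwise R) :
    (PySem.List.sorted xs key).Pairwise
      (fun a b => key a < key b ∨ (key a = key b ∧ R a b)) := by
  rw [PySem.List.sorted_eq_foldl_insertBy]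
  exact sorted_stable_aux key R xs [] (by simp) (by simp) h

-- ---- facts about pairsL / valsL ----
lemma pairsL_perm (A : List Int) : (pairsL A).Perm (PySem.List.enumerate A) :=
  PySem.List.sorted_perm _ _ _

lemma mem_enum_bounds (A : List Int) (p : Int × Int) (hp : p ∈ PySem.List.enumerate A) :
    0 ≤ p.1 ∧ p.1 < 2 ^ (PySem.Int.bitLength ((A.length : Int) - 1)) ∧
      PySem.List.pyGetD A p.1 0 = p.2 := by
  rw [PySem.List.mem_enumerate_iff] at hp
  obtain ⟨k, hk, rfl⟩ := hp
  have hbl := PySem.Int.lt_two_pow_bitLength ((A.length : Int) - 1)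
  have habs : ((A.length : Int) - 1).natAbs = A.length - 1 := by omega
  rw [habs] at hbl
  refine ⟨by simp, ?_, ?_⟩
  · simp only [zero_add]
    have : k < 2 ^ PySem.Int.bitLength ((A.length : Int) - 1) := by omega
    exact_mod_cast this
  · simp only [zero_add]
    rw [PySem.List.pyGetD_eq_getElem A 0 (by simp) (by exact_mod_cast hk)]
    simp

lemma mem_pairsL_bounds (A : List Int) (p : Int × Int) (hp : p ∈ pairsL A) :
    0 ≤ p.1 ∧ p.1 < 2 ^ (PySem.Int.bitLength ((A.length : Int) - 1)) ∧
      PySem.List.pyGetD A p.1 0 = p.2 :=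
  mem_enum_bounds A p ((pairsL_perm A).mem_iff.1 hp)

lemma pairsL_pairwise (A : List Int) :
    (pairsL A).Pairwise (fun p q => p.2 < q.2 ∨ (p.2 = q.2 ∧ p.1 < q.1)) :=
  sorted_stable (fun p : Int × Int => p.2) (fun p q : Int × Int => p.1 < q.1) _ (PySem.List.pairwise_lt_enumerate A 0)

lemma valsL_pairwise (A : List Int) : (valsL A).Pairwise (· ≤ ·) := by
  unfold valsL
  rw [List.pairwise_map]
  exact (pairsL_pairwise A).imp (fun h => by rcases h with h | ⟨h, _⟩ <;> omega)

lemma valsL_perm (A : List Int) : (valsL A).Perm A := by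
  have h := (pairsL_perm A).map (fun p => p.2)
  rwa [PySem.List.map_snd_enumerate] at h

lemma map_enum_snd {α β : Type} (g : α → β) (xs : List α) (st : Int) :
    (PySem.List.enumerate xs st).map (fun p => g p.2) = xs.map g := by
  have : (fun p : Int × α => g p.2) = g ∘ (fun p : Int × α => p.2) := rfl
  rw [this, ← List.map_map, PySem.List.map_snd_enumerate]

-- ---- characterization of port A ----
lemma encoded_eq (A : List Int) :
    (PySem.List.enumerate A).foldl
        (fun (V : List Int) (p : Int × Int) => PySem.List.pySetD V p.1
          (PySem.Int.bor (p.2 <<< (PySem.Int.bitLength ((A.length : Int) - 1))) p.1)) A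
      = (PySem.List.enumerate A).map (encF (PySem.Int.bitLength ((A.length : Int) - 1))) := by
  have h := foldl_enum_set
    (fun i a => PySem.Int.bor ((a <<< (PySem.Int.bitLength ((A.length : Int) - 1)) : Int)) i) A []
  simp only [List.nil_append, List.length_nil, Nat.cast_zero] at h
  rw [h]
  apply List.map_congr_left
  intro p hp
  obtain ⟨h0, h1, _⟩ := mem_enum_bounds A p hp
  simpa [encF] using enc_eq p.2 p.1 _ h0 h1

lemma sorted_encoded_eq (A : List Int) :
    PySem.List.sorted ((PySem.List.enumerate A).map
        (encF (PySem.Int.bitLength ((A.length : Int) - 1)))) (fun x => x)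
      = (pairsL A).map (encF (PySem.Int.bitLength ((A.length : Int) - 1))) := by
  apply PySem.List.sorted_eq_of_perm_of_pairwise_lt
  · exact (pairsL_perm A).map _
  · rw [List.pairwise_map]
    refine (pairsL_pairwise A).imp_of_mem ?_
    intro p q hp hq h
    exact encF_lt _ p q ⟨(mem_pairsL_bounds A p hp).1, (mem_pairsL_bounds A p hp).2.1⟩
      ⟨(mem_pairsL_bounds A q hq).1, (mem_pairsL_bounds A q hq).2.1⟩ h

lemma decoded_eq (A : List Int) (xs : List (Int × Int)) (hxs : ∀ p ∈ xs, p ∈ pairsL A) :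
    (xs.map (encF (PySem.Int.bitLength ((A.length : Int) - 1)))).map
        (fun x : Int => x >>> (PySem.Int.bitLength ((A.length : Int) - 1)))
      = xs.map (fun p => p.2) := by
  rw [List.map_map]
  apply List.map_congr_left
  intro p hp
  obtain ⟨h0, h1, _⟩ := mem_pairsL_bounds A p (hxs p hp)
  exact dec_fst p.2 p.1 _ h0 h1

lemma irank_true_eq (A : List Int) : irank A true = valsL A := by
  unfold irank
  simp only [if_true, encoded_eq, sorted_encoded_eq]
  have h := foldl_enum_set
    (fun (_ : Int) (ai : Int) => ((ai >>> (PySem.Int.bitLength ((A.length : Int) - 1)) : Int),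
      PySem.Int.band ai ((1 <<< (PySem.Int.bitLength ((A.length : Int) - 1)) : Int) - 1)).1)
    ((pairsL A).map (encF (PySem.Int.bitLength ((A.length : Int) - 1)))) []
  simp only [List.nil_append, List.length_nil, Nat.cast_zero] at h
  rw [h]
  have h2 := map_enum_snd
    (fun ai : Int => ai >>> (PySem.Int.bitLength ((A.length : Int) - 1)))
    ((pairsL A).map (encF (PySem.Int.bitLength ((A.length : Int) - 1)))) 0
  exact h2.trans (decoded_eq A (pairsL A) (fun p hp => hp))

lemma fold_dd (l : List Int) : ∀ (D rest : List Int) (p : Int), l.length ≤ rest.length →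
    (let st := l.foldl
        (fun (st : List Int × Int × Int) a =>
          if a ≠ st.2.2 then (PySem.List.pySetD st.1 (st.2.1 + 1) a, st.2.1 + 1, a) else st)
        (D ++ rest, (D.length : Int) - 1, p)
     st.1.take (st.2.1 + 1).toNat) = D ++ goS p l := by
  induction l with
  | nil =>
    intro D rest p _
    simp only [List.foldl_nil, goS]
    have : ((D.length : Int) - 1 + 1).toNat = D.length := by omega
    rw [this, List.take_left]
    simp
  | cons a l ih =>
    intro D rest p hlen
    simp only [List.foldl_cons]
    by_cases hap : a = p
    · rw [if_neg (by simp [hap])]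
      have := ih D rest p (by simpa using Nat.le_of_succ_le hlen)
      simp only at this
      rw [this]
      simp [goS, hap]
    · rw [if_pos (by simp [hap])]
      obtain ⟨r0, rest', rfl⟩ : ∃ r0 rest', rest = r0 :: rest' := by
        cases rest with
        | nil => simp at hlen
        | cons r0 rest' => exact ⟨r0, rest', rfl⟩
      have hidx : ((D.length : Int) - 1 + 1) = ((D.length : Nat) : Int) := by omega
      rw [hidx, PySem.List.pySetD_natCast, List.set_append, if_neg (by omega)]
      simp only [Nat.sub_self, List.set_cons_zero]
      have hres : D ++ a :: rest' = (D ++ [a]) ++ rest' := by simp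
      have hlen2 : ((D.length : Int)) = ((D ++ [a]).length : Int) - 1 := by simp
      rw [hres, hlen2]
      have := ih (D ++ [a]) rest' a (by simpa using hlen)
      simp only at this
      rw [this]
      simp [goS, hap]

lemma fold_dd' (V0 : List Int) (f : Int → Int) :
    (let st := V0.foldl
        (fun (st : List Int × Int × Int) (ai : Int) =>
          let a := f ai
          if a ≠ st.2.2 then (PySem.List.pySetD st.1 (st.2.1 + 1) a, st.2.1 + 1, a) else st)
        (V0, -1, -1)
     st.1.take (st.2.1 + 1).toNat) = goS (-1) (V0.map f) := by
  have h0 := fold_dd (V0.map f) [] V0 (-1) (by simp)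
  simp only [List.nil_append, List.length_nil, Nat.cast_zero, zero_sub] at h0
  rw [List.foldl_map] at h0
  exact h0

lemma irank_false_eq (A : List Int) : irank A false = goS (-1) (valsL A) := by
  unfold irank
  simp only [Bool.false_eq_true, if_false, encoded_eq, sorted_encoded_eq]
  have h := fold_dd' ((pairsL A).map (encF (PySem.Int.bitLength ((A.length : Int) - 1))))
    (fun ai : Int => ((ai >>> (PySem.Int.bitLength ((A.length : Int) - 1)) : Int),
      PySem.Int.band ai ((1 <<< (PySem.Int.bitLength ((A.length : Int) - 1)) : Int) - 1)).1)
  have h2 : ((pairsL A).map (encF (PySem.Int.bitLength ((A.length : Int) - 1)))).map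
      (fun ai : Int => ((ai >>> (PySem.Int.bitLength ((A.length : Int) - 1)) : Int),
        PySem.Int.band ai ((1 <<< (PySem.Int.bitLength ((A.length : Int) - 1)) : Int) - 1)).1)
      = valsL A := decoded_eq A (pairsL A) (fun p hp => hp)
  rw [h2] at h
  exact h

-- ---- characterization of port B ----
lemma irank_alt_true_eq (A : List Int) : irank_alt A true = valsL A := by
  unfold irank_alt
  simp only [if_true]
  have hrange : PySem.List.pyRange 0 (A.length : Int) 1
      = (PySem.List.enumerate A).map (fun p => p.1) := by
    rw [PySem.List.map_fst_enumerate]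
    simp
  rw [hrange, sorted_map_natural,
    sorted_congr_key (fun p : Int × Int => PySem.List.pyGetD A p.1 0) (fun p : Int × Int => p.2)
      _ (fun p hp => (mem_enum_bounds A p hp).2.2),
    List.map_map]
  apply List.map_congr_left
  intro p hp
  exact (mem_pairsL_bounds A p hp).2.2

-- ---- the dedup scan on a sorted list ----
lemma goS_strict (l : List Int) : ∀ (p : Int), l.Pairwise (· ≤ ·) → (∀ x ∈ l, p ≤ x) →
    (goS p l).Pairwise (· < ·) ∧ ∀ x ∈ goS p l, p < x ∧ x ∈ l := by
  induction l with
  | nil => intro p _ _; simp [goS]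
  | cons a l ih =>
    intro p hpw hge
    rw [List.pairwise_cons] at hpw
    by_cases hap : a = p
    · rw [show goS p (a :: l) = goS p l by simp [goS, hap]]
      obtain ⟨h1, h2⟩ := ih p hpw.2 (fun x hx => hap ▸ hpw.1 x hx)
      exact ⟨h1, fun x hx => ⟨(h2 x hx).1, by simp [(h2 x hx).2]⟩⟩
    · rw [show goS p (a :: l) = a :: goS a l by simp [goS, hap]]
      obtain ⟨h1, h2⟩ := ih a hpw.2 hpw.1
      have hpa : p < a := lt_of_le_of_ne (hge a (by simp)) (Ne.symm hap)
      refine ⟨List.Pairwise.cons (fun x hx => (h2 x hx).1) h1, ?_⟩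
      intro x hx
      rcases List.mem_cons.1 hx with rfl | hx
      · exact ⟨hpa, by simp⟩
      · exact ⟨lt_trans hpa (h2 x hx).1, by simp [(h2 x hx).2]⟩

lemma goS_mem (l : List Int) : ∀ (p : Int), l.Pairwise (· ≤ ·) → (∀ x ∈ l, p ≤ x) →
    ∀ x, x ∈ goS p l ↔ (x ∈ l ∧ x ≠ p) := by
  induction l with
  | nil => intro p _ _ x; simp [goS]
  | cons a l ih =>
    intro p hpw hge x
    rw [List.pairwise_cons] at hpw
    by_cases hap : a = p
    · rw [show goS p (a :: l) = goS p l by simp [goS, hap]]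
      rw [ih p hpw.2 (fun y hy => hap ▸ hpw.1 y hy) x]
      constructor
      · rintro ⟨h1, h2⟩; exact ⟨by simp [h1], h2⟩
      · rintro ⟨h1, h2⟩
        rcases List.mem_cons.1 h1 with rfl | h1
        · exact absurd hap h2
        · exact ⟨h1, h2⟩
    · rw [show goS p (a :: l) = a :: goS a l by simp [goS, hap]]
      have hpa : p < a := lt_of_le_of_ne (hge a (by simp)) (Ne.symm hap)
      constructor
      · intro hx
        rcases List.mem_cons.1 hx with rfl | hx
        · exact ⟨by simp, hap⟩
        · obtain ⟨h1, h2⟩ := (ih a hpw.2 hpw.1 x).1 hx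
          exact ⟨by simp [h1], by have := hpw.1 x h1; omega⟩
      · rintro ⟨h1, h2⟩
        rcases List.mem_cons.1 h1 with rfl | h1
        · exact List.mem_cons_self
        · by_cases hxa : x = a
          · simp [hxa]
          · exact List.mem_cons_of_mem _ ((ih a hpw.2 hpw.1 x).2 ⟨h1, hxa⟩)

lemma irank_alt_false_eq (A : List Int) :
    irank_alt A false = PySem.List.sorted (PySem.Set.ofList A) (fun v => v) := by
  rfl

lemma irank_false_spec (A : List Int) (hD : ¬ D_irank A false) :
    irank A false = irank_alt A false := by
  rw [irank_false_eq, irank_alt_false_eq]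
  rcases hvals : valsL A with _ | ⟨a0, rest⟩
  · have hA : A = [] := by
      have := valsL_perm A
      rw [hvals] at this
      exact this.symm.eq_nil
    subst hA
    simp [goS, PySem.Set.ofList, PySem.List.sorted]
  · have hperm := valsL_perm A
    rw [hvals] at hperm
    have hpw := valsL_pairwise A
    rw [hvals, List.pairwise_cons] at hpw
    have ha0 : a0 ≠ -1 := by
      intro h
      apply hD
      refine ⟨rfl, by rw [← h]; exact hperm.subset (by simp), ?_⟩
      intro x hx
      rcases List.mem_cons.1 (hperm.mem_iff.2 hx) with rfl | hx'
      · omega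
      · have := hpw.1 x hx'; omega
    rw [show goS (-1) (a0 :: rest) = a0 :: goS a0 rest by simp [goS, ha0]]
    symm
    apply PySem.List.sorted_eq_of_perm_of_pairwise_lt
    · obtain ⟨hstrict, hmem⟩ := goS_strict rest a0 hpw.2 hpw.1
      have hnd : (a0 :: goS a0 rest).Nodup :=
        (List.Pairwise.cons (fun x hx => (hmem x hx).1) hstrict).imp (fun h => ne_of_lt h)
      rw [List.perm_ext_iff_of_nodup hnd (PySem.Set.nodup_ofList A)]
      intro x
      rw [PySem.Set.mem_ofList, ← hperm.mem_iff]
      rw [List.mem_cons, goS_mem rest a0 hpw.2 hpw.1 x, List.mem_cons]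
      constructor
      · rintro (rfl | ⟨h1, _⟩)
        · exact Or.inl rfl
        · exact Or.inr h1
      · rintro (rfl | h1)
        · exact Or.inl rfl
        · by_cases hxa : x = a0
          · exact Or.inl hxa
          · exact Or.inr ⟨h1, hxa⟩
    · obtain ⟨hstrict, hmem⟩ := goS_strict rest a0 hpw.2 hpw.1
      exact List.Pairwise.cons (fun x hx => (hmem x hx).1) hstrict

-- ===== VERDICT =====
theorem irank_spec : Claim_unchanged_irank := by
  intro A distinct _ hD
  cases distinct
  · exact irank_false_spec A hD
  · rw [irank_true_eq, irank_alt_true_eq]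

theorem irank_changed : Claim_changed_irank := by
  unfold Claim_changed_irank; decide

theorem irank_tight : Claim_exact_irank := by
  intro A distinct _ hD heq
  obtain ⟨hdf, hmem, hall⟩ := hD
  subst hdf
  have h1 : (-1 : Int) ∈ irank_alt A false := by
    rw [irank_alt_false_eq, PySem.List.mem_sorted, PySem.Set.mem_ofList]
    exact hmem
  rw [← heq, irank_false_eq] at h1
  have h2 := (goS_strict (valsL A) (-1) (valsL_pairwise A)
    (fun x hx => hall x ((valsL_perm A).subset hx))).2 _ h1
  omega
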